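-- pv_equiv track=rewrite | github.com/donnelt6/2026-csc1097-donnelt6-szumlig2 | src/apps/worker/worker/tasks.py | _select_caption_format
-- ===== SOURCE A (Python) =====
-- from typing import Iterable, List, Optional
--
-- def _select_caption_format(lang: str, formats: list[dict]) -> Optional[tuple[str, str, str]]:
--     if not formats or not isinstance(formats, list):
--         return None
--     preferred_exts = ["vtt", "srt", "json3", "srv1", "srv2", "srv3", "ttml"]
--     for ext in preferred_exts:
--         for item in formats:
--             if item.get("ext") == ext and item.get("url"):
--                 return lang, item["url"], ext
--     for item in formats:
--         if item.get("url"):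
--             return lang, item["url"], item.get("ext") or "vtt"
--     return None
-- ===== SOURCE B (Python) =====
-- from typing import Optional
--
-- PREFERRED_EXTS = ["vtt", "srt", "json3", "srv1", "srv2", "srv3", "ttml"]
--
-- def _select_caption_format(lang: str, formats: list[dict]) -> Optional[tuple[str, str, str]]:
--     if not formats or not isinstance(formats, list):
--         return None
--     # one pass: first url per ext, and first item with a truthy url overall
--     table = {}
--     first = None
--     for item in formats:
--         url = item.get("url")
--         if not url:
--             continue
--         ext = item.get("ext")
--         if ext is not None and ext not in table:
--             table[ext] = url
--         if first is None:
--             first = (url, ext)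
--     for ext in PREFERRED_EXTS:
--         if ext in table:
--             return lang, table[ext], ext
--     if first is not None:
--         url, ext = first
--         return lang, url, ext or "vtt"
--     return None
-- ===== Notes on version B (the rewrite author's own statement) =====
-- stated objective: alternative
-- what changed: Replaces the nested loop (each of the 7 preferred exts re-scans the whole list) by a single pass over formats that builds an ext->first-url dict and captures the first item with a url, then a constant-size lookup over the preferred exts.
import Mathlib
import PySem

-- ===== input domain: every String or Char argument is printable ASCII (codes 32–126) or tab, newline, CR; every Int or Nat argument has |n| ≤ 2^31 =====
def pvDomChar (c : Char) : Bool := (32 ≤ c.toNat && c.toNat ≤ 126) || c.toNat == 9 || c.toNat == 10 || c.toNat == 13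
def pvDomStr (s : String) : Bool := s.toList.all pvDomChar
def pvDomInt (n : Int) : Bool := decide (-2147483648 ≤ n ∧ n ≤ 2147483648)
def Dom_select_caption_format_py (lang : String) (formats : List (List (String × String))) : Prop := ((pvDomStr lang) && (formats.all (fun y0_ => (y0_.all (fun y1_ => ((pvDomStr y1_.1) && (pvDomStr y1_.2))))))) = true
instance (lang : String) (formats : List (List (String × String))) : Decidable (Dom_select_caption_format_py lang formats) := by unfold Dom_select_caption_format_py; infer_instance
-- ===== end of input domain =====

-- B replaces A's nested scan (each preferred ext re-scans the whole list) by one pass building an ext->first-url dict plus the first item with a url; objective: alternative (single-pass data structure, same measured cost).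


-- dict.get(key) on an item (association list, first match)
def pvGet (item : List (String × String)) (k : String) : Option String :=
  (PySem.Dict.mk item).get? k

-- ===== PORT A =====
-- inner loop of A: first item whose ext equals `ext` and whose url is truthy
def pvFindExt (lang ext : String) : List (List (String × String)) → Option (String × String × String)
  | [] => none
  | item :: rest =>
    match pvGet item "url" with
    | some u => if pvGet item "ext" = some ext ∧ u ≠ "" then some (lang, u, ext) else pvFindExt lang ext rest
    | none => pvFindExt lang ext rest

-- outer loop of A over the preferred extensions
def pvOuter (lang : String) (formats : List (List (String × String))) : List String → Option (String × String × String)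
  | [] => none
  | ext :: rest =>
    match pvFindExt lang ext formats with
    | some r => some r
    | none => pvOuter lang formats rest

-- `ext or "vtt"`
def pvExtOr (eo : Option String) : String :=
  match eo with
  | some e => if e = "" then "vtt" else e
  | none => "vtt"

-- A's final fallback loop: first item with a truthy url
def pvFallback (lang : String) : List (List (String × String)) → Option (String × String × String)
  | [] => none
  | item :: rest =>
    match pvGet item "url" with
    | some u => if u ≠ "" then some (lang, u, pvExtOr (pvGet item "ext")) else pvFallback lang rest
    | none => pvFallback lang rest

def pvPreferredExts : List String := ["vtt", "srt", "json3", "srv1", "srv2", "srv3", "ttml"]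

def select_caption_format_py (lang : String) (formats : List (List (String × String))) : Option (String × String × String) :=
  if formats = [] then none
  else
    match pvOuter lang formats pvPreferredExts with
    | some r => some r
    | none => pvFallback lang formats

-- ===== PORT B =====
-- one step of B's single pass: record first url per ext, and the first (url, ext) overall
def pvScanStep (st : PySem.Dict String String × Option (String × Option String))
    (item : List (String × String)) : PySem.Dict String String × Option (String × Option String) :=
  match pvGet item "url" with
  | none => st
  | some u =>
    if u = "" then st
    else
      let table :=
        match pvGet item "ext" with
        | some e => if st.1.contains e then st.1 else st.1.insert e u
        | none => st.1
      let first := match st.2 with | some f => some f | none => some (u, pvGet item "ext")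
      (table, first)

-- B's second loop: first preferred ext present in the table
def pvPick (lang : String) (table : PySem.Dict String String) : List String → Option (String × String × String)
  | [] => none
  | ext :: rest =>
    match table.get? ext with
    | some u => some (lang, u, ext)
    | none => pvPick lang table rest

def select_caption_format_py_alt (lang : String) (formats : List (List (String × String))) : Option (String × String × String) :=
  if formats = [] then none
  else
    match pvPick lang (formats.foldl pvScanStep (PySem.Dict.empty, none)).1 pvPreferredExts with
    | some r => some r
    | none =>
      match (formats.foldl pvScanStep (PySem.Dict.empty, none)).2 with
      | some (u, eo) => some (lang, u, pvExtOr eo)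
      | none => none

-- ===== PRECONDITION & SPEC =====
def Spec_select_caption_format_py (lang : String) (formats : List (List (String × String))) (out : Option (String × String × String)) : Prop := out = select_caption_format_py_alt lang formats
instance (lang : String) (formats : List (List (String × String))) (out : Option (String × String × String)) : Decidable (Spec_select_caption_format_py lang formats out) := by unfold Spec_select_caption_format_py; infer_instance

-- ===== CLAIM (what is proved, stated in full; the proofs are below) =====
def Claim_equal_select_caption_format_py : Prop := ∀ (lang : String) (formats : List (List (String × String))), Dom_select_caption_format_py lang formats → Spec_select_caption_format_py lang formats (select_caption_format_py lang formats)

-- ===== LEMMAS AND PROOFS =====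

-- first matching url for a given ext (specification of both A's inner loop and B's table entry)
def pvFindUrl (ext : String) : List (List (String × String)) → Option String
  | [] => none
  | item :: rest =>
    match pvGet item "url" with
    | some u => if pvGet item "ext" = some ext ∧ u ≠ "" then some u else pvFindUrl ext rest
    | none => pvFindUrl ext rest

-- first item with a truthy url, as (url, ext-option)
def pvFirst : List (List (String × String)) → Option (String × Option String)
  | [] => none
  | item :: rest =>
    match pvGet item "url" with
    | some u => if u ≠ "" then some (u, pvGet item "ext") else pvFirst rest
    | none => pvFirst rest

theorem pvFindExt_eq (lang ext : String) (fs : List (List (String × String))) :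
    pvFindExt lang ext fs = (pvFindUrl ext fs).map (fun u => (lang, u, ext)) := by
  induction fs with
  | nil => rfl
  | cons item rest ih =>
    simp only [pvFindExt, pvFindUrl]
    cases pvGet item "url" with
    | none => exact ih
    | some u =>
      by_cases h : pvGet item "ext" = some ext ∧ u ≠ ""
      · simp [h]
      · simp [h, ih]

theorem pvFallback_eq (lang : String) (fs : List (List (String × String))) :
    pvFallback lang fs = (pvFirst fs).map (fun p => (lang, p.1, pvExtOr p.2)) := by
  induction fs with
  | nil => rfl
  | cons item rest ih =>
    simp only [pvFallback, pvFirst]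
    cases pvGet item "url" with
    | none => exact ih
    | some u =>
      by_cases h : u ≠ ""
      · simp [h]
      · simp [h, ih]

theorem pvScan_fst (fs : List (List (String × String)))
    (st : PySem.Dict String String × Option (String × Option String)) (e : String) :
    (fs.foldl pvScanStep st).1.get? e = (st.1.get? e).or (pvFindUrl e fs) := by
  induction fs generalizing st with
  | nil => simp [pvFindUrl]
  | cons item rest ih =>
    simp only [List.foldl_cons, pvFindUrl]
    rw [ih]
    simp only [pvScanStep]
    cases hu : pvGet item "url" with
    | none => rfl
    | some u =>
      by_cases hue : u = ""
      · simp [hue]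
      · simp only [if_neg hue]
        cases he : pvGet item "ext" with
        | none => simp
        | some e' =>
          by_cases hee : e' = e
          · subst hee
            have hcond : (pvGet item "ext" = some e' ∧ u ≠ "") := ⟨he, hue⟩
            by_cases hc : st.1.contains e'
            · have hs : (st.1.get? e').isSome := by
                rw [← PySem.Dict.contains_eq_isSome_get?]; exact hc
              obtain ⟨v, hv⟩ := Option.isSome_iff_exists.mp hs
              simp [hc, hv, hcond]
            · have hc' : st.1.contains e' = false := by simpa using hc
              have hn : st.1.get? e' = none := by
                have h2 := PySem.Dict.contains_eq_isSome_get? (d := st.1) (k := e')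
                rw [hc'] at h2
                cases h : st.1.get? e' <;> simp [h] at h2 ⊢
              simp [hc, hn, PySem.Dict.get?_insert_self, hcond]
          · have hne : ¬ (pvGet item "ext" = some e ∧ u ≠ "") := by
              simp only [he]
              intro h
              exact hee (by simpa using h.1)
            have hee' : e ≠ e' := fun h => hee h.symm
            by_cases hc : st.1.contains e'
            · simp [hc, hee]
            · simp only [hc, Bool.false_eq_true, if_false]
              rw [PySem.Dict.get?_insert (d := st.1) (k := e') (v := u) (k' := e)]
              simp [hee', hee]

theorem pvScan_snd (fs : List (List (String × String)))
    (st : PySem.Dict String String × Option (String × Option String)) :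
    (fs.foldl pvScanStep st).2 = (st.2).or (pvFirst fs) := by
  induction fs generalizing st with
  | nil => simp [pvFirst]
  | cons item rest ih =>
    simp only [List.foldl_cons, pvFirst]
    rw [ih]
    simp only [pvScanStep]
    cases hu : pvGet item "url" with
    | none => rfl
    | some u =>
      by_cases hue : u = ""
      · simp [hue]
      · simp only [if_neg hue]
        cases hs : st.2 with
        | none => simp [hue]
        | some f => simp

theorem pvOuter_eq_pick (lang : String) (fs : List (List (String × String)))
    (table : PySem.Dict String String)
    (h : ∀ e, table.get? e = pvFindUrl e fs) (prefs : List String) :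
    pvOuter lang fs prefs = pvPick lang table prefs := by
  induction prefs with
  | nil => rfl
  | cons ext rest ih =>
    simp only [pvOuter, pvPick, pvFindExt_eq, h ext, ih]
    cases pvFindUrl ext fs <;> rfl

theorem select_caption_format_py_spec : Claim_equal_select_caption_format_py := by
  unfold Claim_equal_select_caption_format_py
  intro lang formats _
  unfold Spec_select_caption_format_py select_caption_format_py select_caption_format_py_alt
  by_cases hf : formats = []
  · simp [hf]
  · rw [if_neg hf, if_neg hf]
    have htab : ∀ e, (formats.foldl pvScanStep (PySem.Dict.empty, (none : Option (String × Option String)))).1.get? e = pvFindUrl e formats := by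
      intro e
      rw [pvScan_fst]
      simp [PySem.Dict.get?_empty]
    rw [pvOuter_eq_pick lang formats _ htab pvPreferredExts]
    rw [pvFallback_eq]
    have hsnd := pvScan_snd formats (PySem.Dict.empty, (none : Option (String × Option String)))
    simp only [Option.none_or] at hsnd
    rw [hsnd]
    cases pvPick lang (formats.foldl pvScanStep (PySem.Dict.empty, none)).1 pvPreferredExts with
    | some r => rfl
    | none =>
      cases pvFirst formats with
      | none => rfl
      | some p => cases p; rfl
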